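-- pv_equiv track=rewrite | github.com/BelgacemS/bcsd-benchmark | scripts/organize_dataset.py | split_compound_word
-- ===== SOURCE A (Python) =====
-- KNOWN_WORDS = sorted([
--     "insertion", "selection", "counting", "pigeonhole", "cocktail",
--     "exchange", "patience", "fibonacci", "euclidean", "dijkstra",
--     "bellman", "floyd", "warshall", "kruskal", "hamilton", "hamiltonian",
--     "binary", "linear", "ternary", "interpolation", "exponential",
--     "recursive", "recursion", "iteration", "iterative",
--     "bubble", "merge", "quick", "heap", "radix", "bucket", "shell",
--     "gnome", "stooge", "shaker", "circle", "cycle", "comb", "bogo",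
--     "bead", "bitonic", "pancake", "sleep", "tree", "wave", "wiggle",
--     "tim", "intro", "simple", "odd", "even", "sort", "search",
--     "depth", "breadth", "first", "matrix", "array", "list", "stack",
--     "queue", "graph", "number", "string", "linked", "hash", "table",
--     "random", "pivot", "non", "nr",
-- ], key=len, reverse=True)
--
-- def split_compound_word(word):
--     """Decoupe un mot compose comme 'bubblesort' en ['bubble', 'sort']."""
--     if "_" in word:
--         return word.lower().split("_")
--
--     word_lower = word.lower()
--     parts = []
--     remaining = word_lower
--
--     while remaining:
--         matched = False
--         for known in KNOWN_WORDS: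
--             if remaining.startswith(known) and len(known) > 1:
--                 parts.append(known)
--                 remaining = remaining[len(known):]
--                 matched = True
--                 break
--         if not matched:
--             if remaining:
--                 parts.append(remaining)
--             break
--
--     return parts if parts else [word_lower]
-- ===== SOURCE B (Python) =====
-- KNOWN_WORDS = sorted([
--     "insertion", "selection", "counting", "pigeonhole", "cocktail",
--     "exchange", "patience", "fibonacci", "euclidean", "dijkstra",
--     "bellman", "floyd", "warshall", "kruskal", "hamilton", "hamiltonian",
--     "binary", "linear", "ternary", "interpolation", "exponential",
--     "recursive", "recursion", "iteration", "iterative",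
--     "bubble", "merge", "quick", "heap", "radix", "bucket", "shell",
--     "gnome", "stooge", "shaker", "circle", "cycle", "comb", "bogo",
--     "bead", "bitonic", "pancake", "sleep", "tree", "wave", "wiggle",
--     "tim", "intro", "simple", "odd", "even", "sort", "search",
--     "depth", "breadth", "first", "matrix", "array", "list", "stack",
--     "queue", "graph", "number", "string", "linked", "hash", "table",
--     "random", "pivot", "non", "nr",
-- ], key=len, reverse=True)
--
--
-- def _build_trie():
--     """Prefix trie: each node is {char: child_node}, '$' marks a word end."""
--     root = {}
--     for w in KNOWN_WORDS:
--         if len(w) > 1: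
--             node = root
--             for c in w:
--                 node = node.setdefault(c, {})
--             node['$'] = True
--     return root
--
--
-- _TRIE = _build_trie()
--
--
-- def _longest_prefix_len(s):
--     """Length of the longest known word that prefixes s, or None."""
--     node = _TRIE
--     best = None
--     for j, c in enumerate(s):
--         node = node.get(c)
--         if node is None:
--             break
--         if '$' in node:
--             best = j + 1
--     return best
--
--
-- def _split(s):
--     """Recursively split a non-empty lowercase string on trie matches."""
--     n = _longest_prefix_len(s)
--     if n is None:
--         return [s]
--     rest = s[n:]
--     return [s[:n]] + (_split(rest) if rest else [])
--
--
-- def split_compound_word(word):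
--     """Decoupe un mot compose comme 'bubblesort' en ['bubble', 'sort']."""
--     if "_" in word:
--         return word.lower().split("_")
--
--     word_lower = word.lower()
--     return _split(word_lower) if word_lower else [word_lower]
-- ===== Notes on version B (the rewrite author's own statement) =====
-- stated objective: alternative
-- what changed: A's per-position scan of the 70-entry length-sorted word list (one startswith per entry) is replaced by a prefix trie built once from the known words, walked character by character to the deepest word-end for the longest match, and the accumulator while-loop is replaced by a recursive decomposition that peels one match per call.
import Mathlib
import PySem

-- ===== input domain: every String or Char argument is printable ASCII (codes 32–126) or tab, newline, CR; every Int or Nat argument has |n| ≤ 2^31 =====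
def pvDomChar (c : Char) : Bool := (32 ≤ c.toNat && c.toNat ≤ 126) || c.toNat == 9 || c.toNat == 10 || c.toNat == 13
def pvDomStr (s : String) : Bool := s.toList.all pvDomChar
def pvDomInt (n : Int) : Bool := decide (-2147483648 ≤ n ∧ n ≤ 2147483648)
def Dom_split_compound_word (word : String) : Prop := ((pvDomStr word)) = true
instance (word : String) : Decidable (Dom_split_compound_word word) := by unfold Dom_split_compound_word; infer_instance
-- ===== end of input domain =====

-- B replaces A's per-position scan over the 70-entry length-sorted word list by a prefix trie
-- built once from the known words; at each position it walks the trie and takes the deepest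
-- word-end as the longest match (objective: alternative data structure, not claimed faster here).

-- ===== PORT A =====
-- module literal, source order
def pvKnownRaw : List String := [
  "insertion", "selection", "counting", "pigeonhole", "cocktail",
  "exchange", "patience", "fibonacci", "euclidean", "dijkstra",
  "bellman", "floyd", "warshall", "kruskal", "hamilton", "hamiltonian",
  "binary", "linear", "ternary", "interpolation", "exponential",
  "recursive", "recursion", "iteration", "iterative",
  "bubble", "merge", "quick", "heap", "radix", "bucket", "shell",
  "gnome", "stooge", "shaker", "circle", "cycle", "comb", "bogo",
  "bead", "bitonic", "pancake", "sleep", "tree", "wave", "wiggle",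
  "tim", "intro", "simple", "odd", "even", "sort", "search",
  "depth", "breadth", "first", "matrix", "array", "list", "stack",
  "queue", "graph", "number", "string", "linked", "hash", "table",
  "random", "pivot", "non", "nr"]

-- KNOWN_WORDS = sorted([...], key=len, reverse=True)   (shared module constant; char-list form)
def pvKnownWords : List (List Char) :=
  PySem.List.sorted (pvKnownRaw.map String.toList) (fun w => w.length) true

-- inner 'for known in KNOWN_WORDS: if remaining.startswith(known) and len(known) > 1: … break'
def pvFindA (rem : List Char) : Option (List Char) :=
  pvKnownWords.find? (fun known => PySem.Chars.startswith rem known && decide (1 < known.length))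

lemma pvFindA_len {rem w : List Char} (h : pvFindA rem = some w) : 1 < w.length := by
  have hp := List.find?_some h
  simp only [Bool.and_eq_true, decide_eq_true_eq] at hp
  exact hp.2

-- the while loop of A (parts is the accumulator)
def pvLoopA (rem : List Char) (parts : List (List Char)) : List (List Char) :=
  if h : rem = [] then parts
  else
    match hm : pvFindA rem with
    | some known => pvLoopA (rem.drop known.length) (parts ++ [known])
    | none => parts ++ [rem]
termination_by rem.length
decreasing_by
  have h1 := pvFindA_len hm
  have h2 : rem.length ≠ 0 := by simpa [List.length_eq_zero_iff] using h
  simp only [List.length_drop]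
  omega

def split_compound_word (word : String) : List String :=
  if PySem.Str.isIn "_" word then
    match PySem.Str.split? (PySem.Str.lower word) "_" with
    | some ps => ps
    | none => []
  else
    let word_lower := PySem.Chars.lower word.toList
    let parts := pvLoopA word_lower []
    (if parts = [] then [word_lower] else parts).map (fun cs => String.ofList cs)

-- ===== PORT B =====
-- the trie: a node is (word-end marker, edge list); edges carry the child node inline,
-- so a single (non-nested) inductive suffices: cons c end childEdges rest
inductive PvEdges where
  | nil : PvEdges
  | cons : Char → Bool → PvEdges → PvEdges → PvEdges

-- node.get(c)
def pvEdge : PvEdges → Char → Option (Bool × PvEdges)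
  | .nil, _ => none
  | .cons c e ch rest, a => if a = c then some (e, ch) else pvEdge rest a

-- write back the child for c (setdefault's update)
def pvSetEdge : PvEdges → Char → Bool × PvEdges → PvEdges
  | .nil, a, nt => .cons a nt.1 nt.2 .nil
  | .cons c e ch rest, a, nt =>
    if a = c then .cons c nt.1 nt.2 rest else .cons c e ch (pvSetEdge rest a nt)

-- node.setdefault(c, {})
def pvChild (es : PvEdges) (c : Char) : Bool × PvEdges :=
  (pvEdge es c).getD (false, .nil)

-- 'node = root; for c in w: node = node.setdefault(c, {}); node["$"] = True'
def pvInsert : Bool × PvEdges → List Char → Bool × PvEdges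
  | t, [] => (true, t.2)
  | t, c :: cs => (t.1, pvSetEdge t.2 c (pvInsert (pvChild t.2 c) cs))

-- _TRIE = _build_trie()
def pvTrie : Bool × PvEdges :=
  pvKnownWords.foldl (fun t w => if 1 < w.length then pvInsert t w else t) (false, .nil)

-- 'for j, c in enumerate(s): node = node.get(c); if node is None: break; if "$" in node: best = j+1'
def pvWalk : Bool × PvEdges → List Char → Nat → Option Nat → Option Nat
  | _, [], _, best => best
  | t, c :: cs, d, best =>
    match pvEdge t.2 c with
    | none => best
    | some t' => pvWalk t' cs (d + 1) (if t'.1 then some (d + 1) else best)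

-- _longest_prefix_len(remaining)
def pvLongest (rem : List Char) : Option Nat := pvWalk pvTrie rem 0 none

-- needed by pvLoopB's termination proof (cited by name in decreasing_by)
lemma pvWalk_bound : ∀ (rem : List Char) (t : Bool × PvEdges) (d : Nat) (best : Option Nat) (n : Nat),
    (∀ b, best = some b → 1 ≤ b ∧ b ≤ d) → pvWalk t rem d best = some n →
    1 ≤ n ∧ n ≤ d + rem.length := by
  intro rem
  induction rem with
  | nil =>
    intro t d best n hb h
    simpa using hb n h
  | cons c cs ih =>
    intro t d best n hb h
    rw [pvWalk] at h
    cases he : pvEdge t.2 c with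
    | none =>
      rw [he] at h
      have := hb n h
      simp only [List.length_cons]
      omega
    | some t' =>
      rw [he] at h
      have hb' : ∀ b, (if t'.1 then some (d + 1) else best) = some b → 1 ≤ b ∧ b ≤ d + 1 := by
        intro b hbb
        split at hbb
        · cases hbb; omega
        · have := hb b hbb; omega
      have := ih t' (d + 1) _ n hb' h
      simp only [List.length_cons]
      omega

lemma pvLongest_pos {rem : List Char} {n : Nat} (h : pvLongest rem = some n) :
    1 ≤ n ∧ n ≤ rem.length := by
  have := pvWalk_bound rem pvTrie 0 none n (by intro b hb; cases hb) h
  omega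

-- _split(s): recursive decomposition, one trie match peeled off per call
def pvSplitB (rem : List Char) : List (List Char) :=
  match hm : pvLongest rem with
  | none => [rem]
  | some n => [rem.take n] ++ (if rem.drop n = [] then [] else pvSplitB (rem.drop n))
termination_by rem.length
decreasing_by
  have h1 := pvLongest_pos hm
  simp only [List.length_drop]
  omega

def split_compound_word_alt (word : String) : List String :=
  if PySem.Str.isIn "_" word then
    match PySem.Str.split? (PySem.Str.lower word) "_" with
    | some ps => ps
    | none => []
  else
    let word_lower := PySem.Chars.lower word.toList
    (if word_lower = [] then [word_lower] else pvSplitB word_lower).map (fun cs => String.ofList cs)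

-- ===== PRECONDITION & SPEC =====
def Spec_split_compound_word (word : String) (out : List String) : Prop := out = split_compound_word_alt word
instance (word : String) (out : List String) : Decidable (Spec_split_compound_word word out) := by unfold Spec_split_compound_word; infer_instance

-- ===== CLAIM (what is proved, stated in full; the proofs are below) =====
def Claim_equal_split_compound_word : Prop := ∀ (word : String), Dom_split_compound_word word → Spec_split_compound_word word (split_compound_word word)

-- ===== LEMMAS AND PROOFS =====

set_option maxRecDepth 100000 in
lemma pvKn_len : ∀ w ∈ pvKnownWords, 1 < w.length := by decide

-- A's find?: characterization of 'no match'
lemma pvFindA_none {rem : List Char} :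
    pvFindA rem = none ↔ ∀ u ∈ pvKnownWords, ¬ u <+: rem := by
  rw [pvFindA, List.find?_eq_none]
  constructor
  · intro h u hu hpre
    have hne := h u hu
    simp only [Bool.and_eq_true, decide_eq_true_eq, not_and] at hne
    exact hne ((PySem.Chars.startswith_iff rem u).mpr hpre) (pvKn_len u hu)
  · intro h u hu
    simp only [Bool.and_eq_true, decide_eq_true_eq, not_and]
    intro hsw _
    exact h u hu ((PySem.Chars.startswith_iff rem u).mp hsw)

-- first match in a list sorted by length descending is a longest match
lemma pvFindMax {K : List (List Char)} {rem w : List Char}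
    (hs : K.Pairwise (fun a b => b.length ≤ a.length))
    (h : K.find? (fun k => PySem.Chars.startswith rem k && decide (1 < k.length)) = some w) :
    w ∈ K ∧ w <+: rem ∧ 1 < w.length ∧ ∀ u ∈ K, u <+: rem → u.length ≤ w.length := by
  induction K with
  | nil => simp at h
  | cons a t ih =>
    by_cases hp : (PySem.Chars.startswith rem a && decide (1 < a.length)) = true
    · rw [List.find?_cons_of_pos (p := fun k => PySem.Chars.startswith rem k && decide (1 < k.length)) hp] at h
      cases h
      simp only [Bool.and_eq_true, decide_eq_true_eq] at hp
      refine ⟨List.mem_cons_self, (PySem.Chars.startswith_iff rem w).mp hp.1, hp.2, ?_⟩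
      intro u hu _
      rcases List.mem_cons.mp hu with rfl | hu
      · exact le_refl _
      · exact (List.pairwise_cons.mp hs).1 u hu
    · rw [List.find?_cons_of_neg (p := fun k => PySem.Chars.startswith rem k && decide (1 < k.length)) (by simpa using hp)] at h
      obtain ⟨hw, hpre, hwlen, hmax⟩ := ih (List.pairwise_cons.mp hs).2 h
      refine ⟨List.mem_cons_of_mem _ hw, hpre, hwlen, ?_⟩
      intro u hu hup
      rcases List.mem_cons.mp hu with rfl | hu
      · by_cases hlen : 1 < u.length
        · exfalso
          apply hp
          simp only [Bool.and_eq_true, decide_eq_true_eq]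
          exact ⟨(PySem.Chars.startswith_iff rem u).mpr hup, hlen⟩
        · omega
      · exact hmax u hu hup

lemma pvKn_sorted : pvKnownWords.Pairwise (fun a b => b.length ≤ a.length) :=
  PySem.List.sorted_pairwise_rev (pvKnownRaw.map String.toList) (fun w => w.length)

lemma pvFindA_some {rem w : List Char} (h : pvFindA rem = some w) :
    w ∈ pvKnownWords ∧ w <+: rem ∧ ∀ u ∈ pvKnownWords, u <+: rem → u.length ≤ w.length :=
  let ⟨h1, h2, _, h4⟩ := pvFindMax pvKn_sorted h
  ⟨h1, h2, h4⟩

-- B's trie: membership of a word (walking all its edges ends at an end-marked node)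
def pvMem : Bool × PvEdges → List Char → Bool
  | t, [] => t.1
  | t, c :: cs =>
    match pvEdge t.2 c with
    | none => false
    | some t' => pvMem t' cs

lemma pvMem_empty : ∀ w : List Char, pvMem (false, .nil) w = false := by
  intro w
  cases w with
  | nil => rfl
  | cons c cs => simp [pvMem, pvEdge]

lemma pvEdge_setEdge (es : PvEdges) (c : Char) (t : Bool × PvEdges) (a : Char) :
    pvEdge (pvSetEdge es c t) a = if a = c then some t else pvEdge es a := by
  induction es with
  | nil => simp [pvSetEdge, pvEdge]
  | cons c' e' ch' rest' ih1 ih2 =>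
    simp only [pvSetEdge]
    by_cases h1 : c = c'
    · subst h1
      rw [if_pos rfl]
      by_cases h2 : a = c
      · subst h2
        simp [pvEdge]
      · simp [pvEdge, h2]
    · rw [if_neg h1]
      by_cases h2 : a = c'
      · subst h2
        simp [pvEdge, Ne.symm h1]
      · simp [pvEdge, h2, ih2]

lemma pvMem_insert : ∀ (v : List Char) (t : Bool × PvEdges) (w : List Char),
    pvMem (pvInsert t v) w = (decide (w = v) || pvMem t w) := by
  intro v
  induction v with
  | nil =>
    intro t w
    cases w with
    | nil => simp [pvInsert, pvMem]
    | cons a ws => simp [pvInsert, pvMem]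
  | cons c cs ih =>
    intro t w
    cases w with
    | nil => simp [pvInsert, pvMem]
    | cons a ws =>
      show pvMem (t.1, pvSetEdge t.2 c (pvInsert (pvChild t.2 c) cs)) (a :: ws) = _
      rw [pvMem]
      simp only [pvEdge_setEdge]
      by_cases h : a = c
      · subst h
        rw [if_pos rfl]
        have hchild : pvMem (pvInsert (pvChild t.2 a) cs) ws
            = (decide (ws = cs) || pvMem (pvChild t.2 a) ws) := ih _ ws
        simp only [hchild]
        have hm : pvMem t (a :: ws) = pvMem (pvChild t.2 a) ws := by
          rw [pvMem]
          cases he : pvEdge t.2 a with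
          | none => simp [pvChild, he, pvMem_empty]
          | some t' => simp [pvChild, he]
        rw [hm]
        simp
      · rw [if_neg h, pvMem]
        simp [h]

lemma pvMem_build : ∀ (ws : List (List Char)) (t : Bool × PvEdges) (w : List Char),
    (pvMem (ws.foldl (fun t v => if 1 < v.length then pvInsert t v else t) t) w = true)
      ↔ ((w ∈ ws ∧ 1 < w.length) ∨ pvMem t w = true) := by
  intro ws
  induction ws with
  | nil => simp
  | cons a as ih =>
    intro t w
    simp only [List.foldl_cons, ih, List.mem_cons]
    by_cases ha : 1 < a.length
    · rw [if_pos ha, pvMem_insert]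
      by_cases hw : w = a
      · subst hw
        simp [ha]
      · rw [decide_eq_false hw, Bool.false_or]
        tauto
    · rw [if_neg ha]
      constructor
      · rintro (h1 | h2)
        · exact Or.inl ⟨Or.inr h1.1, h1.2⟩
        · exact Or.inr h2
      · rintro (⟨h1 | h1, h2⟩ | h3)
        · exact absurd (h1 ▸ h2) ha
        · exact Or.inl ⟨h1, h2⟩
        · exact Or.inr h3

lemma pvMem_trie (w : List Char) :
    pvMem pvTrie w = true ↔ w ∈ pvKnownWords ∧ 1 < w.length := by
  rw [pvTrie, pvMem_build]
  simp [pvMem_empty]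

-- full characterization of the walk: (a) result shape, (b) it dominates every member prefix
lemma pvWalk_spec : ∀ (rem : List Char) (t : Bool × PvEdges) (d : Nat) (best : Option Nat),
    (pvWalk t rem d best = best ∨
      ∃ k, 1 ≤ k ∧ k ≤ rem.length ∧ pvMem t (rem.take k) = true ∧
        pvWalk t rem d best = some (d + k)) ∧
    (∀ k, 1 ≤ k → k ≤ rem.length → pvMem t (rem.take k) = true →
      ∃ m, pvWalk t rem d best = some m ∧ d + k ≤ m) := by
  intro rem
  induction rem with
  | nil =>
    intro t d best
    refine ⟨Or.inl rfl, ?_⟩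
    intro k h1 h2 _
    simp at h2
    omega
  | cons c cs ih =>
    intro t d best
    cases he : pvEdge t.2 c with
    | none =>
      simp only [pvWalk, he]
      refine ⟨Or.inl trivial, ?_⟩
      intro k h1 h2 hm
      exfalso
      cases k with
      | zero => omega
      | succ k' => simp [pvMem, List.take_succ_cons, he] at hm
    | some t' =>
      simp only [pvWalk, he]
      have key : ∀ k, 1 ≤ k → k ≤ cs.length + 1 →
          (pvMem t ((c :: cs).take k) = true ↔
            (k = 1 ∧ t'.1 = true) ∨ (2 ≤ k ∧ pvMem t' (cs.take (k - 1)) = true)) := by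
        intro k h1 h2
        cases k with
        | zero => omega
        | succ k' =>
          simp only [List.take_succ_cons, pvMem, he]
          cases k' with
          | zero => simp [pvMem]
          | succ k'' =>
            constructor
            · intro h; exact Or.inr ⟨by omega, by simpa using h⟩
            · rintro (⟨h3, _⟩ | ⟨_, h4⟩)
              · omega
              · simpa using h4
      obtain ⟨iha, ihb⟩ := ih t' (d + 1) (if t'.1 then some (d + 1) else best)
      constructor
      · rcases iha with h | ⟨k, hk1, hk2, hk3, hk4⟩
        · rw [h]
          by_cases hend : t'.1 = true
          · refine Or.inr ⟨1, le_refl _, by simp, ?_, ?_⟩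
            · exact (key 1 (by omega) (by omega)).mpr (Or.inl ⟨rfl, hend⟩)
            · simp [hend]
          · left
            simp [hend]
        · refine Or.inr ⟨k + 1, by omega, by simp; omega, ?_, ?_⟩
          · exact (key (k + 1) (by omega) (by simp; omega)).mpr (Or.inr ⟨by omega, by simpa using hk3⟩)
          · rw [hk4]; congr 1; omega
      · intro k h1 h2 hm
        simp only [List.length_cons] at h2
        rcases (key k h1 h2).mp hm with ⟨hk1, hend⟩ | ⟨hk2, hmem⟩
        · subst hk1
          -- best becomes some (d+1); the walk never drops below it
          rw [if_pos hend]
          -- show the result is some m with d + 1 ≤ m, using (a) of the ih at best = some (d+1)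
          obtain ⟨iha', _⟩ := ih t' (d + 1) (some (d + 1))
          rcases iha' with h | ⟨k', _, _, _, hk4'⟩
          · exact ⟨d + 1, h, le_refl _⟩
          · exact ⟨d + 1 + k', hk4', by omega⟩
        · obtain ⟨m, hm1, hm2⟩ := ihb (k - 1) (by omega) (by omega) hmem
          exact ⟨m, hm1, by omega⟩

-- B's longest-match: characterizations matching pvFindA's
lemma pvLongest_none {rem : List Char} (h : pvLongest rem = none) :
    ∀ u ∈ pvKnownWords, ¬ u <+: rem := by
  intro u hu hpre
  have hlen := pvKn_len u hu
  have htake : rem.take u.length = u := (List.prefix_iff_eq_take.mp hpre).symm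
  have hmem : pvMem pvTrie (rem.take u.length) = true := by
    rw [htake]; exact (pvMem_trie u).mpr ⟨hu, hlen⟩
  obtain ⟨m, hm, _⟩ := (pvWalk_spec rem pvTrie 0 none).2 u.length (by omega) hpre.length_le hmem
  rw [pvLongest] at h
  rw [h] at hm
  cases hm

lemma pvLongest_some {rem : List Char} {n : Nat} (h : pvLongest rem = some n) :
    rem.take n ∈ pvKnownWords ∧ (rem.take n).length = n ∧
      ∀ u ∈ pvKnownWords, u <+: rem → u.length ≤ n := by
  obtain ⟨ha, hb⟩ := pvWalk_spec rem pvTrie 0 none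
  rw [pvLongest] at h
  rcases ha with h0 | ⟨k, hk1, hk2, hk3, hk4⟩
  · rw [h] at h0; cases h0
  · rw [h] at hk4
    have hkn : n = k := by cases hk4; omega
    subst hkn
    obtain ⟨hmem, _⟩ := (pvMem_trie _).mp hk3
    refine ⟨hmem, by simp [hk2], ?_⟩
    intro u hu hup
    have htake : rem.take u.length = u := (List.prefix_iff_eq_take.mp hup).symm
    have hm2 : pvMem pvTrie (rem.take u.length) = true := by
      rw [htake]; exact (pvMem_trie u).mpr ⟨hu, pvKn_len u hu⟩
    obtain ⟨m, hm, hle⟩ := hb u.length (by have := pvKn_len u hu; omega) hup.length_le hm2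
    rw [h] at hm
    cases hm
    omega

-- the two longest-match mechanisms agree
lemma pvFind_eq (rem : List Char) :
    pvFindA rem = (match pvLongest rem with
                   | some n => some (rem.take n)
                   | none => none) := by
  cases hB : pvLongest rem with
  | none =>
    cases hA : pvFindA rem with
    | none => rfl
    | some w =>
      obtain ⟨hw, hwp, _⟩ := pvFindA_some hA
      exact absurd hwp (pvLongest_none hB w hw)
  | some n =>
    obtain ⟨hmem, hlen, hmax⟩ := pvLongest_some hB
    cases hA : pvFindA rem with
    | none => exact absurd (List.take_prefix _ _) (pvFindA_none.mp hA _ hmem)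
    | some w =>
      obtain ⟨hw, hwp, hwmax⟩ := pvFindA_some hA
      have h1 : (rem.take n).length ≤ w.length := hwmax _ hmem (List.take_prefix _ _)
      have h2 : w.length ≤ n := hmax w hw hwp
      have : w = rem.take n :=
        ((List.prefix_of_prefix_length_le (List.take_prefix _ _) hwp (by omega)).eq_of_length
          (by omega)).symm
      rw [this]

lemma pvLoopA_none {rem : List Char} (parts : List (List Char)) (h : rem ≠ [])
    (hf : pvFindA rem = none) : pvLoopA rem parts = parts ++ [rem] := by
  rw [pvLoopA, dif_neg h]
  split
  · next k hk => rw [hf] at hk; cases hk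
  · rfl

lemma pvLoopA_some {rem known : List Char} (parts : List (List Char)) (h : rem ≠ [])
    (hf : pvFindA rem = some known) :
    pvLoopA rem parts = pvLoopA (rem.drop known.length) (parts ++ [known]) := by
  rw [pvLoopA, dif_neg h]
  split
  · next k hk => rw [hf] at hk; cases hk; rfl
  · next hk => rw [hf] at hk; cases hk

lemma pvSplitB_none {rem : List Char} (hf : pvLongest rem = none) : pvSplitB rem = [rem] := by
  rw [pvSplitB]
  split
  · rfl
  · next k hk => rw [hf] at hk; cases hk

lemma pvSplitB_some {rem : List Char} {m : Nat} (hf : pvLongest rem = some m) :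
    pvSplitB rem = [rem.take m] ++ (if rem.drop m = [] then [] else pvSplitB (rem.drop m)) := by
  rw [pvSplitB]
  split
  · next hk => rw [hf] at hk; cases hk
  · next k hk => rw [hf] at hk; cases hk; rfl

lemma pvSplitB_ne_nil (rem : List Char) : pvSplitB rem ≠ [] := by
  cases hf : pvLongest rem with
  | none => rw [pvSplitB_none hf]; simp
  | some m => rw [pvSplitB_some hf]; simp

lemma pvLoopA_nil (parts : List (List Char)) : pvLoopA [] parts = parts := by
  rw [pvLoopA]
  simp

lemma pvLoop_eq : ∀ (fuel : Nat) (rem : List Char), rem.length ≤ fuel → rem ≠ [] →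
    ∀ parts, pvLoopA rem parts = parts ++ pvSplitB rem := by
  intro fuel
  induction fuel with
  | zero =>
    intro rem hlen hnil parts
    exact absurd (by simpa [List.length_eq_zero_iff] using Nat.le_zero.mp hlen) hnil
  | succ n ih =>
    intro rem hlen hnil parts
    cases hB : pvLongest rem with
    | none =>
      have hA : pvFindA rem = none := by rw [pvFind_eq rem, hB]
      rw [pvLoopA_none parts hnil hA, pvSplitB_none hB]
    | some m =>
      have hm := pvLongest_pos hB
      have hlt : (rem.take m).length = m := by simp; omega
      have hA : pvFindA rem = some (rem.take m) := by rw [pvFind_eq rem, hB]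
      rw [pvLoopA_some parts hnil hA, pvSplitB_some hB, hlt]
      by_cases hd : rem.drop m = []
      · rw [hd, pvLoopA_nil]
        simp
      · rw [ih (rem.drop m) (by simp [List.length_drop]; omega) hd (parts ++ [rem.take m]),
           if_neg hd]
        simp

-- ===== VERDICT (by name: the statement is the Claim_ definition above) =====
theorem split_compound_word_spec : Claim_equal_split_compound_word := by
  intro word _
  unfold Spec_split_compound_word split_compound_word split_compound_word_alt
  split_ifs with h
  · rfl
  · by_cases hnil : PySem.Chars.lower word.toList = []
    · simp [hnil, pvLoopA_nil]
    · have hl := pvLoop_eq (PySem.Chars.lower word.toList).length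
        (PySem.Chars.lower word.toList) (le_refl _) hnil []
      simp only [hl, List.nil_append, if_neg hnil, if_neg (pvSplitB_ne_nil _)]
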